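-- pv_equiv track=rewrite | github.com/ibrahimmustafacv/Cupid-Pro | Cupid/cupid-pro.py | extract_raw_data
-- ===== SOURCE A (Python) =====
-- def extract_raw_data(info):
--     raw = set()
--     for key, value in info.items():
--         if len(value) >= 2:
--             raw.add(value)
--             raw.add(value.lower())
--             raw.add(value.upper())
--             raw.add(value.capitalize())
--             parts = value.split()
--             for part in parts:
--                 if len(part) >= 2:
--                     raw.add(part)
--                     raw.add(part.lower())
--                     raw.add(part.upper())
--                     raw.add(part.capitalize())
--         if "email" in key and "@" in value:
--             email_local = value.split('@')[0]
--             if len(email_local) >= 2: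
--                 raw.add(email_local)
--                 raw.add(email_local.lower())
--                 raw.add(email_local.upper())
--                 raw.add(email_local.capitalize())
--     for key, val in info.items():
--         if key.startswith("child_"):
--             if len(val) >= 2:
--                 raw.add(val)
--                 raw.add(val.lower())
--                 raw.add(val.upper())
--                 raw.add(val.capitalize())
--                 parts = val.split()
--                 for part in parts:
--                     if len(part) >= 2:
--                         raw.add(part)
--                         raw.add(part.lower())
--                         raw.add(part.upper())
--                         raw.add(part.capitalize())
--     return list(raw)
-- ===== SOURCE B (Python) =====
-- def extract_raw_data(info):
--     # Pass 1: collect the base strings to expand (every value covers the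
--     # redundant child_ loop of the original, since child_ keys are keys too).
--     bases = []
--     for key, value in info.items():
--         if len(value) >= 2:
--             bases.append(value)
--             for part in value.split():
--                 if len(part) >= 2:
--                     bases.append(part)
--         if "email" in key and "@" in value:
--             local = value.split('@')[0]
--             if len(local) >= 2:
--                 bases.append(local)
--     # Pass 2: expand each base into its four case variants.
--     raw = set()
--     for s in bases:
--         raw.add(s)
--         raw.add(s.lower())
--         raw.add(s.upper())
--         raw.add(s.capitalize())
--     return list(raw)
-- ===== Notes on version B (the rewrite author's own statement) =====
-- stated objective: simpler
-- what changed: Collect-then-expand: one pass gathers base strings (value, long whitespace parts, email local part) and a second pass adds the four case variants of each; the separate child_ loop of A is dropped entirely because those values are already covered by the general per-value handling, so the resulting set is identical.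
import Mathlib
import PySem

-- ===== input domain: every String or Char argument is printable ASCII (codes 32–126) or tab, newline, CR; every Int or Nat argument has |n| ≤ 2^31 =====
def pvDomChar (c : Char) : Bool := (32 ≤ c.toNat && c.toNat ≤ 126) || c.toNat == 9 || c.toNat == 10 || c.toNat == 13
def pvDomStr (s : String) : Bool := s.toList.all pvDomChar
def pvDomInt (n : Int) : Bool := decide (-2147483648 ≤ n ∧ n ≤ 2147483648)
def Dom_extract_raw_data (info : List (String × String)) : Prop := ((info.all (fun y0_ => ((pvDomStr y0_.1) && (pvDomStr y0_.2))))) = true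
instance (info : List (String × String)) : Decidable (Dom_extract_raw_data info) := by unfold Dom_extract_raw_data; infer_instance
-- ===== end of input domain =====

-- B replaces A's inline variant expansion and its redundant child_ loop by a collect-bases
-- pass followed by one expansion pass (objective: simpler); the returned set is the same.

-- str.capitalize(): first char uppercased, rest lowercased — exact on the ASCII domain
-- (where Python's titlecase of the first char is its uppercase).
def pyCapitalize (s : String) : String :=
  match s.toList with
  | [] => ""
  | c :: cs => String.ofList (PySem.Chars.upperChar c :: PySem.Chars.lower cs)

-- value.split('@')[0]  (split? with a nonempty separator is always some nonempty list)
def emailLocal (v : String) : String :=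
  ((PySem.Str.split? v "@").getD []).headD ""

-- the repeated block 'raw.add(x); raw.add(x.lower()); raw.add(x.upper()); raw.add(x.capitalize())'
def addCase (r : PySem.Set String) (x : String) : PySem.Set String :=
  (((r.add x).add (PySem.Str.lower x)).add (PySem.Str.upper x)).add (pyCapitalize x)

-- ===== PORT A =====
def extract_raw_data (info : List (String × String)) : List String :=
  let items := (PySem.Dict.ofList info).items
  let raw : PySem.Set String :=
    items.foldl (fun raw kv =>
      let raw :=
        if 2 ≤ PySem.Str.len kv.2 then
          (PySem.Str.split₀ kv.2).foldl
            (fun r p => if 2 ≤ PySem.Str.len p then addCase r p else r)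
            (addCase raw kv.2)
        else raw
      if PySem.Str.isIn "email" kv.1 && PySem.Str.isIn "@" kv.2 then
        if 2 ≤ PySem.Str.len (emailLocal kv.2) then addCase raw (emailLocal kv.2) else raw
      else raw) PySem.Set.empty
  items.foldl (fun raw kv =>
    if PySem.Str.startswith kv.1 "child_" then
      if 2 ≤ PySem.Str.len kv.2 then
        (PySem.Str.split₀ kv.2).foldl
          (fun r p => if 2 ≤ PySem.Str.len p then addCase r p else r)
          (addCase raw kv.2)
      else raw
    else raw) raw

-- ===== PORT B =====
def extract_raw_data_alt (info : List (String × String)) : List String :=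
  let items := (PySem.Dict.ofList info).items
  let bases : List String :=
    items.foldl (fun acc kv =>
      let acc :=
        if 2 ≤ PySem.Str.len kv.2 then
          (PySem.Str.split₀ kv.2).foldl
            (fun a p => if 2 ≤ PySem.Str.len p then a ++ [p] else a)
            (acc ++ [kv.2])
        else acc
      if PySem.Str.isIn "email" kv.1 && PySem.Str.isIn "@" kv.2 then
        if 2 ≤ PySem.Str.len (emailLocal kv.2) then acc ++ [emailLocal kv.2] else acc
      else acc) []
  bases.foldl (fun r s => addCase r s) PySem.Set.empty

-- ===== PRECONDITION & SPEC =====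
def Spec_extract_raw_data (info : List (String × String)) (out : List String) : Prop := out = extract_raw_data_alt info
instance (info : List (String × String)) (out : List String) : Decidable (Spec_extract_raw_data info out) := by unfold Spec_extract_raw_data; infer_instance

-- ===== CLAIM (what is proved, stated in full; the proofs are below) =====
def Claim_equal_extract_raw_data : Prop := ∀ (info : List (String × String)), Dom_extract_raw_data info → Spec_extract_raw_data info (extract_raw_data info)

-- ===== LEMMAS AND PROOFS =====

-- the four case variants of a base string
def variants (x : String) : List String :=
  [x, PySem.Str.lower x, PySem.Str.upper x, pyCapitalize x]

-- the base strings an item (key, value) contributes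
def basesOf (kv : String × String) : List String :=
  (if 2 ≤ PySem.Str.len kv.2 then
      kv.2 :: (PySem.Str.split₀ kv.2).filter (fun p => decide (2 ≤ PySem.Str.len p))
    else [])
  ++ (if PySem.Str.isIn "email" kv.1 && PySem.Str.isIn "@" kv.2 then
        (if 2 ≤ PySem.Str.len (emailLocal kv.2) then [emailLocal kv.2] else [])
      else [])

theorem addCase_eq_update (r : PySem.Set String) (x : String) :
    addCase r x = PySem.Set.update r (variants x) := rfl

theorem foldl_update_eq_update_flatMap {α : Type} (g : α → List String) :
    ∀ (L : List α) (r : PySem.Set String),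
      L.foldl (fun r p => PySem.Set.update r (g p)) r = PySem.Set.update r (L.flatMap g)
  | [], r => by simp [PySem.Set.update]
  | p :: L, r => by
      simp only [List.foldl_cons, List.flatMap_cons, PySem.Set.update_append]
      exact foldl_update_eq_update_flatMap g L _

-- A's inner parts loop, as one update
theorem innerA_eq (v : String) (r : PySem.Set String) :
    (PySem.Str.split₀ v).foldl
      (fun r p => if 2 ≤ PySem.Str.len p then addCase r p else r) r
    = PySem.Set.update r
        (((PySem.Str.split₀ v).filter (fun p => decide (2 ≤ PySem.Str.len p))).flatMap variants) := by
  rw [PySem.List.foldl_ite_eq_foldl_filter]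
  rw [← foldl_update_eq_update_flatMap variants _ r]
  exact PySem.List.foldl_congr_mem _ _ _ _ (fun r p _ => addCase_eq_update r p)

-- A's first-loop body updates by exactly the variants of the item's bases
theorem stepA_eq (r : PySem.Set String) (kv : String × String) :
    (let r' :=
        if 2 ≤ PySem.Str.len kv.2 then
          (PySem.Str.split₀ kv.2).foldl
            (fun r p => if 2 ≤ PySem.Str.len p then addCase r p else r)
            (addCase r kv.2)
        else r
      if PySem.Str.isIn "email" kv.1 && PySem.Str.isIn "@" kv.2 then
        if 2 ≤ PySem.Str.len (emailLocal kv.2) then addCase r' (emailLocal kv.2) else r'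
      else r')
    = PySem.Set.update r ((basesOf kv).flatMap variants) := by
  by_cases h1 : 2 ≤ PySem.Str.len kv.2 <;>
    by_cases h2 : (PySem.Str.isIn "email" kv.1 && PySem.Str.isIn "@" kv.2) = true <;>
      by_cases h3 : 2 ≤ PySem.Str.len (emailLocal kv.2) <;>
        simp only [basesOf, h1, h2, h3, if_true, if_false, Bool.false_eq_true] <;>
      (try rw [innerA_eq]) <;>
      simp only [addCase_eq_update,
        List.flatMap_cons, List.flatMap_nil, List.flatMap_append,
        List.append_nil, List.nil_append, List.append_assoc,
        PySem.Set.update_append, PySem.Set.update_nil]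

-- B's first-loop body appends exactly the item's bases
theorem stepB_eq (acc : List String) (kv : String × String) :
    (let acc' :=
        if 2 ≤ PySem.Str.len kv.2 then
          (PySem.Str.split₀ kv.2).foldl
            (fun a p => if 2 ≤ PySem.Str.len p then a ++ [p] else a)
            (acc ++ [kv.2])
        else acc
      if PySem.Str.isIn "email" kv.1 && PySem.Str.isIn "@" kv.2 then
        if 2 ≤ PySem.Str.len (emailLocal kv.2) then acc' ++ [emailLocal kv.2] else acc'
      else acc')
    = acc ++ basesOf kv := by
  by_cases h1 : 2 ≤ PySem.Str.len kv.2 <;>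
    by_cases h2 : (PySem.Str.isIn "email" kv.1 && PySem.Str.isIn "@" kv.2) = true <;>
      by_cases h3 : 2 ≤ PySem.Str.len (emailLocal kv.2) <;>
        simp only [basesOf, h1, h2, h3, if_true, if_false, Bool.false_eq_true,
          PySem.List.foldl_append_ite_eq_filter,
          List.cons_append, List.append_nil, List.nil_append, List.append_assoc]

-- updating with already-present elements is a no-op
theorem update_of_subset {L : List String} {s : PySem.Set String}
    (h : ∀ x ∈ L, x ∈ s) : PySem.Set.update s L = s := by
  induction L generalizing s with
  | nil => rfl
  | cons x L ih =>
      have hx : s.add x = s := PySem.Set.add_of_mem (h x (by simp))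
      show PySem.Set.update (s.add x) L = s
      rw [hx]; exact ih (fun y hy => h y (by simp [hy]))

-- A's child_ loop adds nothing that the first loop has not already added
theorem child_loop_noop (items : List (String × String)) (s : PySem.Set String)
    (hs : ∀ kv ∈ items, ∀ x ∈ (basesOf kv).flatMap variants, x ∈ s) :
    items.foldl (fun raw kv =>
      if PySem.Str.startswith kv.1 "child_" then
        if 2 ≤ PySem.Str.len kv.2 then
          (PySem.Str.split₀ kv.2).foldl
            (fun r p => if 2 ≤ PySem.Str.len p then addCase r p else r)
            (addCase raw kv.2)
        else raw
      else raw) s = s := by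
  induction items with
  | nil => rfl
  | cons kv items ih =>
      simp only [List.foldl_cons]
      have hkv := hs kv (by simp)
      have hbody : (if PySem.Str.startswith kv.1 "child_" then
          if 2 ≤ PySem.Str.len kv.2 then
            (PySem.Str.split₀ kv.2).foldl
              (fun r p => if 2 ≤ PySem.Str.len p then addCase r p else r)
              (addCase s kv.2)
          else s
        else s) = s := by
        by_cases hc : PySem.Str.startswith kv.1 "child_" = true
        · rw [if_pos hc]
          by_cases h1 : 2 ≤ PySem.Str.len kv.2
          · rw [if_pos h1, innerA_eq, addCase_eq_update, ← PySem.Set.update_append]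
            apply update_of_subset
            intro x hx
            apply hkv
            rcases List.mem_append.1 hx with hx | hx
            · refine List.mem_flatMap.2 ⟨kv.2, ?_, hx⟩
              unfold basesOf
              rw [if_pos h1]
              exact List.mem_append_left _ (by simp)
            · rcases List.mem_flatMap.1 hx with ⟨p, hp, hxp⟩
              refine List.mem_flatMap.2 ⟨p, ?_, hxp⟩
              unfold basesOf
              rw [if_pos h1]
              exact List.mem_append_left _ (List.mem_cons_of_mem _ hp)
          · rw [if_neg h1]
        · rw [if_neg hc]
      rw [hbody]
      exact ih (fun kv' h' => hs kv' (by simp [h']))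

-- ===== VERDICT (by name: the statement is the Claim_ definition above) =====
theorem extract_raw_data_spec : Claim_equal_extract_raw_data := by
  intro info _
  show extract_raw_data info = extract_raw_data_alt info
  unfold extract_raw_data extract_raw_data_alt
  set items := (PySem.Dict.ofList info).items with hitems
  simp only []
  have hA1 : items.foldl (fun raw kv =>
      let raw :=
        if 2 ≤ PySem.Str.len kv.2 then
          (PySem.Str.split₀ kv.2).foldl
            (fun r p => if 2 ≤ PySem.Str.len p then addCase r p else r)
            (addCase raw kv.2)
        else raw
      if PySem.Str.isIn "email" kv.1 && PySem.Str.isIn "@" kv.2 then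
        if 2 ≤ PySem.Str.len (emailLocal kv.2) then addCase raw (emailLocal kv.2) else raw
      else raw) PySem.Set.empty
      = PySem.Set.update PySem.Set.empty (items.flatMap (fun kv => (basesOf kv).flatMap variants)) := by
    rw [PySem.List.foldl_congr_mem items _
      (fun r kv => PySem.Set.update r ((basesOf kv).flatMap variants)) _
      (fun r kv _ => stepA_eq r kv)]
    exact foldl_update_eq_update_flatMap _ items PySem.Set.empty
  have hB : (items.foldl (fun acc kv =>
        let acc :=
          if 2 ≤ PySem.Str.len kv.2 then
            (PySem.Str.split₀ kv.2).foldl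
              (fun a p => if 2 ≤ PySem.Str.len p then a ++ [p] else a)
              (acc ++ [kv.2])
          else acc
        if PySem.Str.isIn "email" kv.1 && PySem.Str.isIn "@" kv.2 then
          if 2 ≤ PySem.Str.len (emailLocal kv.2) then acc ++ [emailLocal kv.2] else acc
        else acc) []).foldl (fun r s => addCase r s) PySem.Set.empty
      = PySem.Set.update PySem.Set.empty (items.flatMap (fun kv => (basesOf kv).flatMap variants)) := by
    rw [PySem.List.foldl_congr_mem items _
      (fun acc kv => acc ++ basesOf kv) _
      (fun acc kv _ => stepB_eq acc kv)]
    rw [PySem.List.foldl_append_eq_flatMap basesOf items []]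
    simp only [List.nil_append]
    rw [PySem.List.foldl_congr_mem _ _
      (fun r s => PySem.Set.update r (variants s)) _
      (fun r s _ => addCase_eq_update r s)]
    rw [foldl_update_eq_update_flatMap variants (items.flatMap basesOf) PySem.Set.empty]
    rw [List.flatMap_assoc]
  rw [hA1, hB]
  apply child_loop_noop
  intro kv hkv x hx
  rw [PySem.Set.mem_update]
  right
  exact List.mem_flatMap.2 ⟨kv, hkv, hx⟩
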